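-- pv_equiv track=rewrite | github.com/ryanhan1201/Compiler_ChocoPy | pa4-benches/program_322_1.py | count_num_consonants
-- ===== SOURCE A (Python) =====
-- consonants: str = "bcdfghjklmnpqrstvwxyzBCDFGHJKLMNPQRSTVWXYZ"
--
-- def count_num_consonants(x:str) -> int:
--     count: int = 0
--     elem: str = ""
--     const: str = ""
--     i: int = 0
--     j : int = 0
--
--     while i < len(x):
--         j = 0
--         elem = x[i]
--         i = i + 1
--         while j < len(consonants):
--             const = consonants[j]
--             j = j + 1
--             if elem == const:
--                 count = count + 1
--     return count
-- ===== SOURCE B (Python) =====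
-- consonants: str = "bcdfghjklmnpqrstvwxyzBCDFGHJKLMNPQRSTVWXYZ"
--
-- def count_num_consonants(x: str) -> int:
--     counts = {}
--     for ch in x:
--         counts[ch] = counts.get(ch, 0) + 1
--     total = 0
--     for c in consonants:
--         total += counts.get(c, 0)
--     return total
-- ===== Notes on version B (the rewrite author's own statement) =====
-- stated objective: faster
-- what changed: B builds a character-frequency dict of the input in one pass, then sums the counts over the fixed 42-consonant alphabet, instead of scanning the whole consonant string once per input character.
import Mathlib
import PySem

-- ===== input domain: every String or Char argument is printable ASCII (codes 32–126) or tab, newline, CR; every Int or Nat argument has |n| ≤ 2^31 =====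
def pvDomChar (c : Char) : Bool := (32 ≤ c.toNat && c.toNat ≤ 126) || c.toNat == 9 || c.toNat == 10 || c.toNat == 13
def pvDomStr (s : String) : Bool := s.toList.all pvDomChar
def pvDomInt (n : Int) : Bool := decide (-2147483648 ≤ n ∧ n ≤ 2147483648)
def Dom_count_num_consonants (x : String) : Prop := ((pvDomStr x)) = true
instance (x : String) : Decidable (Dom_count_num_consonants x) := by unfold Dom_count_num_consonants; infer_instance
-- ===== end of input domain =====

-- B replaces A's per-character scan of the consonant string by one frequency dict of the
-- input plus a single pass over the fixed consonant alphabet (objective: faster, constant factor).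

-- shared module constant 'consonants'
def pvConsonants : List Char := "bcdfghjklmnpqrstvwxyzBCDFGHJKLMNPQRSTVWXYZ".toList

-- ===== PORT A =====
-- outer while over x, inner while over consonants, += 1 on equality
def count_num_consonants (x : String) : Int :=
  x.toList.foldl
    (fun count elem =>
      pvConsonants.foldl (fun count const => if elem == const then count + 1 else count) count)
    0

-- ===== PORT B =====
-- counts[ch] = counts.get(ch, 0) + 1 over x, then total += counts.get(c, 0) over consonants
def count_num_consonants_alt (x : String) : Int :=
  let counts : PySem.Dict Char Int :=
    x.toList.foldl (fun d ch => d.insert ch (d.getD ch 0 + 1)) PySem.Dict.empty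
  pvConsonants.foldl (fun total c => total + counts.getD c 0) 0

-- ===== PRECONDITION & SPEC =====
def Spec_count_num_consonants (x : String) (out : Int) : Prop := out = count_num_consonants_alt x
instance (x : String) (out : Int) : Decidable (Spec_count_num_consonants x out) := by unfold Spec_count_num_consonants; infer_instance

-- ===== CLAIM (what is proved, stated in full; the proofs are below) =====
def Claim_equal_count_num_consonants : Prop := ∀ (x : String), Dom_count_num_consonants x → Spec_count_num_consonants x (count_num_consonants x)

-- ===== LEMMAS AND PROOFS =====

-- sum over the characters of l of (count of e in cs) = sum over cs of (count of c in l)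
theorem pv_inner_count (cs : List Char) (e : Char) (a : Int) :
    cs.foldl (fun c k => if e == k then c + 1 else c) a = a + (cs.count e : Int) := by
  induction cs generalizing a with
  | nil => simp
  | cons k cs ihc =>
    simp only [List.foldl_cons, List.count_cons, ihc]
    by_cases h : e = k
    · subst h; simp; ring
    · simp [h, Ne.symm h]

theorem pv_sum_count_ite (cs : List Char) (e : Char) :
    (cs.map (fun c => if e == c then (1:Int) else 0)).sum = (cs.count e : Int) := by
  induction cs with
  | nil => simp
  | cons c cs ihc =>
    simp only [List.map_cons, List.sum_cons, List.count_cons, ihc]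
    push_cast
    by_cases h : e = c
    · subst h; simp; ring
    · simp [h, Ne.symm h]

theorem pv_sum_count_comm (l cs : List Char) :
    (l.map (fun e => (cs.count e : Int))).sum = (cs.map (fun c => (l.count c : Int))).sum := by
  induction l with
  | nil => simp
  | cons e l ih =>
    simp only [List.map_cons, List.sum_cons, ih, List.count_cons]
    push_cast
    rw [List.sum_map_add]
    rw [pv_sum_count_ite]
    ring

theorem pv_A_eq_sum (x : String) :
    count_num_consonants x = (x.toList.map (fun e => (pvConsonants.count e : Int))).sum := by
  unfold count_num_consonants
  have h1 : x.toList.foldl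
      (fun count elem =>
        pvConsonants.foldl (fun count const => if elem == const then count + 1 else count) count) 0
    = x.toList.foldl (fun count elem => count + (pvConsonants.count elem : Int)) 0 :=
    PySem.List.foldl_congr_mem _ _ _ _ (fun acc e _ => pv_inner_count pvConsonants e acc)
  rw [h1, PySem.List.foldl_add]
  simp

theorem pv_B_eq_sum (x : String) :
    count_num_consonants_alt x = (pvConsonants.map (fun c => (x.toList.count c : Int))).sum := by
  unfold count_num_consonants_alt
  simp only []
  have h1 : pvConsonants.foldl
      (fun total c => total +
        (x.toList.foldl (fun d ch => d.insert ch (d.getD ch 0 + 1)) PySem.Dict.empty).getD c 0) 0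
    = pvConsonants.foldl (fun total c => total + (x.toList.count c : Int)) 0 :=
    PySem.List.foldl_congr_mem _ _ _ _ (fun acc c _ => by
      rw [PySem.Dict.getD_foldl_insert_add_one]
      simp [PySem.Dict.getD, PySem.Dict.get?, PySem.Dict.empty])
  rw [h1, PySem.List.foldl_add]
  simp

-- ===== VERDICT (by name: the statement is the Claim_ definition above) =====
theorem count_num_consonants_spec : Claim_equal_count_num_consonants := by
  intro x _
  unfold Spec_count_num_consonants
  rw [pv_A_eq_sum, pv_B_eq_sum, pv_sum_count_comm]
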